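-- pv_equiv track=rewrite | github.com/ismaeljda/travel_planner | app_old.py | categorize_activity
-- ===== SOURCE A (Python) =====
-- def categorize_activity(category, tags):
--     """Categorize activity type"""
--     category_lower = category.lower()
--     tags_lower = [tag.lower() for tag in tags]
--
--     if 'restaurant' in category_lower or 'food' in category_lower:
--         return 'restaurant'
--     elif 'museum' in category_lower or 'art' in category_lower:
--         return 'culture'
--     elif 'beach' in category_lower or any('beach' in tag for tag in tags_lower):
--         return 'beach'
--     elif 'nightlife' in category_lower or 'bar' in category_lower:
--         return 'nightlife'
--     elif 'outdoor' in category_lower or 'park' in category_lower: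
--         return 'nature'
--     elif 'shopping' in category_lower:
--         return 'shopping'
--     else:
--         return 'sights'
-- ===== SOURCE B (Python) =====
-- # Different aggregation: score every keyword once, take the MINIMUM priority of all
-- # matches (instead of short-circuiting a first-match chain), then index a label table.
-- KEYWORDS = [('restaurant', 0), ('food', 0), ('museum', 1), ('art', 1), ('beach', 2),
--             ('nightlife', 3), ('bar', 3), ('outdoor', 4), ('park', 4), ('shopping', 5)]
-- LABELS = ['restaurant', 'culture', 'beach', 'nightlife', 'nature', 'shopping', 'sights']
--
-- def categorize_activity(category, tags):
--     cl = category.lower()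
--     prios = [p for kw, p in KEYWORDS if kw in cl]
--     if any('beach' in t.lower() for t in tags):
--         prios.append(2)
--     return LABELS[min(prios, default=6)]
-- ===== Notes on version B (the rewrite author's own statement) =====
-- stated objective: alternative
-- what changed: Replaces A's short-circuiting first-match if/elif chain by scoring: collect the priorities of ALL matching keywords (plus the beach tag rule), take the minimum, and index a label table.
import Mathlib
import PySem

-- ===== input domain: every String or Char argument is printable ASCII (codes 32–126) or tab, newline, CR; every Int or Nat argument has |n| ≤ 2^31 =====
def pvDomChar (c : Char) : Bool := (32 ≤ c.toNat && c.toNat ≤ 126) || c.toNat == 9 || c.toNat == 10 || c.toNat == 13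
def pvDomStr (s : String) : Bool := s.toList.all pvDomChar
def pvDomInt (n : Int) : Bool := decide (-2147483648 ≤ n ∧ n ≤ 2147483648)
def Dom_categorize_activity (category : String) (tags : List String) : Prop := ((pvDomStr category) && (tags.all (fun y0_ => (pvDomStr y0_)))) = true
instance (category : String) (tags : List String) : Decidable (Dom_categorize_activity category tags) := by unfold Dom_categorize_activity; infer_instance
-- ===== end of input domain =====

-- B scores all keywords and takes the minimum priority into a label table, instead of A's first-match if/elif chain (objective: alternative).

-- ===== PORT A =====
def categorize_activity (category : String) (tags : List String) : String :=
  let category_lower := PySem.Str.lower category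
  let tags_lower := tags.map PySem.Str.lower
  if PySem.Str.isIn "restaurant" category_lower || PySem.Str.isIn "food" category_lower then "restaurant"
  else if PySem.Str.isIn "museum" category_lower || PySem.Str.isIn "art" category_lower then "culture"
  else if PySem.Str.isIn "beach" category_lower || tags_lower.any (fun tag => PySem.Str.isIn "beach" tag) then "beach"
  else if PySem.Str.isIn "nightlife" category_lower || PySem.Str.isIn "bar" category_lower then "nightlife"
  else if PySem.Str.isIn "outdoor" category_lower || PySem.Str.isIn "park" category_lower then "nature"
  else if PySem.Str.isIn "shopping" category_lower then "shopping"
  else "sights"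

-- ===== PORT B =====
def pvKeywords : List (String × Int) :=
  [("restaurant", 0), ("food", 0), ("museum", 1), ("art", 1), ("beach", 2),
   ("nightlife", 3), ("bar", 3), ("outdoor", 4), ("park", 4), ("shopping", 5)]

def pvLabels : List String :=
  ["restaurant", "culture", "beach", "nightlife", "nature", "shopping", "sights"]

def categorize_activity_alt (category : String) (tags : List String) : String :=
  let cl := PySem.Str.lower category
  let prios := (pvKeywords.filter (fun kp => PySem.Str.isIn kp.1 cl)).map (fun kp => kp.2)
  let prios := if tags.any (fun t => PySem.Str.isIn "beach" (PySem.Str.lower t)) then prios ++ [2] else prios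
  -- LABELS[...] : the index is always 0..6, hence in range; getD is unreachable
  (PySem.List.pyGet? pvLabels ((PySem.List.min? prios (fun x => x)).getD 6)).getD "sights"

-- ===== PRECONDITION & SPEC =====
def Spec_categorize_activity (category : String) (tags : List String) (out : String) : Prop := out = categorize_activity_alt category tags
instance (category : String) (tags : List String) (out : String) : Decidable (Spec_categorize_activity category tags out) := by unfold Spec_categorize_activity; infer_instance

-- ===== CLAIM (what is proved, stated in full; the proofs are below) =====
def Claim_equal_categorize_activity : Prop := ∀ (category : String) (tags : List String), Dom_categorize_activity category tags → Spec_categorize_activity category tags (categorize_activity category tags)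

-- ===== LEMMAS AND PROOFS =====

-- ===== VERDICT (by name: the statement is the Claim_ definition above) =====
theorem categorize_activity_spec : Claim_equal_categorize_activity := by
  intro category tags _
  unfold Spec_categorize_activity categorize_activity categorize_activity_alt
  simp only [pvKeywords, List.filter_cons, List.filter_nil, List.any_map, Function.comp_def]
  generalize PySem.Str.isIn "restaurant" (PySem.Str.lower category) = b1
  generalize PySem.Str.isIn "food" (PySem.Str.lower category) = b2
  generalize PySem.Str.isIn "museum" (PySem.Str.lower category) = b3
  generalize PySem.Str.isIn "art" (PySem.Str.lower category) = b4
  generalize PySem.Str.isIn "beach" (PySem.Str.lower category) = b5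
  generalize PySem.Str.isIn "nightlife" (PySem.Str.lower category) = b6
  generalize PySem.Str.isIn "bar" (PySem.Str.lower category) = b7
  generalize PySem.Str.isIn "outdoor" (PySem.Str.lower category) = b8
  generalize PySem.Str.isIn "park" (PySem.Str.lower category) = b9
  generalize PySem.Str.isIn "shopping" (PySem.Str.lower category) = b10
  generalize (tags.any fun t => PySem.Str.isIn "beach" (PySem.Str.lower t)) = bt
  revert b1 b2 b3 b4 b5 b6 b7 b8 b9 b10 bt
  decide
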